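-- pv_equiv track=rewrite | github.com/collinsakenga/codewars_solutions | 6 kyu/String searching with wildcard.py | find
-- ===== SOURCE A (Python) =====
-- def find(needle, haystack):
--     for i in range(len(haystack)-len(needle)+1):
--         flag=True
--         for j,char in enumerate(needle):
--             if char=="_":
--                 continue
--             elif char!=haystack[i+j]:
--                 flag=False
--                 break
--         if flag:
--             return i
--     return -1
-- ===== SOURCE B (Python) =====
-- def find(needle, haystack):
--     # Bitap (shift-and) wildcard search: precompute per-character bitmasks of the
--     # needle, then scan the haystack once, maintaining a bitset of all needle
--     # prefixes that match ending at the current character.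
--     m = len(needle)
--     if m == 0:
--         return 0
--     masks = {}
--     wild = 0
--     for j, c in enumerate(needle):
--         if c == '_':
--             wild |= 1 << j
--         else:
--             masks[c] = masks.get(c, 0) | (1 << j)
--     goal = 1 << (m - 1)
--     d = 0
--     for k, c in enumerate(haystack):
--         d = ((d << 1) | 1) & (masks.get(c, 0) | wild)
--         if d & goal:
--             return k - m + 1
--     return -1
-- ===== Notes on version B (the rewrite author's own statement) =====
-- stated objective: alternative
-- what changed: Replaces A's nested sliding-window loops by the bitap (shift-and) algorithm: per-character bitmasks of the needle are precomputed into a dict, then a single pass over the haystack updates a bitset of all matching needle prefixes with shift/or/and, reporting a match when the top bit appears.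
import Mathlib
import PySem

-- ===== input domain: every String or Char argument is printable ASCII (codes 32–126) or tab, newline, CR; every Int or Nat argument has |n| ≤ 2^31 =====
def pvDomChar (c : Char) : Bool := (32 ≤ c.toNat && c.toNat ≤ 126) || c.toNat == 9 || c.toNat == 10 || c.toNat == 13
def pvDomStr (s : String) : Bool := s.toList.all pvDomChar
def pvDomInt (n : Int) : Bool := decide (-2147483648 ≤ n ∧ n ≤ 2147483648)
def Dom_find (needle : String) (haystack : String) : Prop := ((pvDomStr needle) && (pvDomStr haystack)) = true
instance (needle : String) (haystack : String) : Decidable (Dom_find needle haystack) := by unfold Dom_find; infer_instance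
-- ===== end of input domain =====

-- B replaces A's nested sliding-window loops by the bitap (shift-and) algorithm:
-- per-character bitmasks of the needle are precomputed once, then a single pass
-- over the haystack maintains a bitset of all needle prefixes matching at the
-- current position; no speed claim is made.

-- ===== PORT A =====
-- inner 'for j,char in enumerate(needle)' loop computing the flag (with break);
-- haystack[i+j] is always in range for the indices A reaches, so pyGet? = some _ there
def pvInnerA (haystack : List Char) (i : Int) : List (Int × Char) → Bool
  | [] => true
  | (j, c) :: rest =>
    if c == '_' then pvInnerA haystack i rest
    else if PySem.List.pyGet? haystack (i + j) ≠ some c then false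
    else pvInnerA haystack i rest

-- outer 'for i in range(len(haystack)-len(needle)+1)' loop with early return
def pvOuterA (needle haystack : List Char) : List Int → Int
  | [] => -1
  | i :: rest =>
    if pvInnerA haystack i (PySem.List.enumerate needle 0) then i
    else pvOuterA needle haystack rest

def find (needle : String) (haystack : String) : Int :=
  pvOuterA needle.toList haystack.toList
    (PySem.List.pyRange 0 ((haystack.toList.length : Int) - (needle.toList.length : Int) + 1) 1)

-- ===== PORT B =====
-- 'for j, c in enumerate(needle)' building the masks dict and the wildcard mask;
-- the enumerate index is a nonnegative Nat, and the bitsets are nonnegative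
-- Python ints, so they are Nat
def pvBuildMasks (d : PySem.Dict Char Nat) (w : Nat) (j : Nat) :
    List Char → PySem.Dict Char Nat × Nat
  | [] => (d, w)
  | c :: rest =>
    if c == '_' then pvBuildMasks d (w ||| (1 <<< j)) (j + 1) rest
    else pvBuildMasks (d.insert c (d.getD c 0 ||| (1 <<< j))) w (j + 1) rest

-- 'for k, c in enumerate(haystack)' scan; Python's 'if d & goal:' truthiness is the ≠ 0 test
def pvScan (masks : PySem.Dict Char Nat) (wild goal m : Nat) (d : Nat) (k : Nat) :
    List Char → Int
  | [] => -1
  | c :: rest =>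
    let d' := ((d <<< 1) ||| 1) &&& (masks.getD c 0 ||| wild)
    if d' &&& goal ≠ 0 then (k : Int) - (m : Int) + 1
    else pvScan masks wild goal m d' (k + 1) rest

def find_alt (needle : String) (haystack : String) : Int :=
  let nd := needle.toList
  if nd.length = 0 then 0
  else
    let mw := pvBuildMasks PySem.Dict.empty 0 0 nd
    pvScan mw.1 mw.2 (1 <<< (nd.length - 1)) nd.length 0 0 haystack.toList

-- ===== PRECONDITION & SPEC =====
def Spec_find (needle : String) (haystack : String) (out : Int) : Prop := out = find_alt needle haystack
instance (needle : String) (haystack : String) (out : Int) : Decidable (Spec_find needle haystack out) := by unfold Spec_find; infer_instance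

-- ===== CLAIM (what is proved, stated in full; the proofs are below) =====
def Claim_equal_find : Prop := ∀ (needle : String) (haystack : String), Dom_find needle haystack → Spec_find needle haystack (find needle haystack)

-- ===== LEMMAS AND PROOFS =====

-- 'needle position t is compatible with character c'
def pvMCh (nd : List Char) (t : Nat) (c : Char) : Bool :=
  nd.getD t ' ' == '_' || nd.getD t ' ' == c

-- 'the needle matches the window of haystack starting at i' (bounds handled separately)
def pvMatch (nd h : List Char) (i : Nat) : Bool :=
  decide (∀ t < nd.length, pvMCh nd t (h.getD (i + t) ' ') = true)

theorem testBit_one' (n : Nat) : Nat.testBit 1 n = decide (n = 0) := by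
  have : (1 : Nat) = 1 <<< 0 := rfl
  rw [this, Nat.shiftLeft_eq, one_mul, Nat.testBit_two_pow]
  simp [eq_comm]

theorem and_shift_ne_zero (n i : Nat) : (n &&& (1 <<< i) ≠ 0) = (n.testBit i = true) := by
  simp only [eq_iff_iff, Nat.shiftLeft_eq, one_mul, Nat.and_two_pow]
  rcases h : n.testBit i <;> simp

theorem pvFindRangeLemma (p : Nat → Bool) (j : Nat) :
    ∀ (s L : Nat), s ≤ j → j < s + L → p j = true → (∀ i, s ≤ i → i < j → p i = false) →
    (List.range' s L).find? p = some j := by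
  intro s L
  induction L generalizing s with
  | zero => omega
  | succ L ih =>
    intro hsj hj hp hlt
    rw [List.range'_succ, List.find?_cons]
    by_cases hs : s = j
    · subst hs; simp [hp]
    · rw [hlt s le_rfl (by omega)]
      exact ih (s+1) (by omega) (by omega) hp (fun i h1 h2 => hlt i (by omega) h2)

-- ---- A side ----

theorem innerA_eq (h : List Char) (nd : List Char) (i : Nat) :
    ∀ (s : Nat), i + s + nd.length ≤ h.length →
    pvInnerA h (i : Int) (PySem.List.enumerate nd (s : Int))
      = decide (∀ t < nd.length, pvMCh nd t (h.getD (i + s + t) ' ') = true) := by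
  induction nd with
  | nil => intro s _; simp [PySem.List.enumerate_nil, pvInnerA]
  | cons c tl ih =>
    intro s hb
    have hlt : i + s < h.length := by simp at hb; omega
    have hget : PySem.List.pyGet? h ((i : Int) + (s : Int)) = some h[i + s] := by
      have : ((i : Int) + (s : Int)) = ((i + s : Nat) : Int) := by push_cast; ring
      rw [this, PySem.List.pyGet?_natCast]
      simp [hlt]
    have hgd : h.getD (i + s) ' ' = h[i + s] := List.getD_eq_getElem h ' ' hlt
    have hb' : i + (s + 1) + tl.length ≤ h.length := by simp at hb ⊢; omega
    have ihs := ih (s + 1) hb'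
    have hsplit : (∀ t < (c :: tl).length, pvMCh (c :: tl) t (h.getD (i + s + t) ' ') = true)
        ↔ (pvMCh (c :: tl) 0 (h.getD (i + s) ' ') = true
           ∧ ∀ t < tl.length, pvMCh tl t (h.getD (i + (s + 1) + t) ' ') = true) := by
      constructor
      · intro H
        refine ⟨by simpa using H 0 (by simp), fun t ht => ?_⟩
        have := H (t + 1) (by simp; omega)
        have he : i + s + (t + 1) = i + (s + 1) + t := by omega
        simpa [pvMCh, he] using this
      · rintro ⟨H0, H⟩ t ht
        cases t with
        | zero => simpa using H0
        | succ t =>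
          have ht' : t < tl.length := by simp at ht; omega
          have := H t ht'
          have he : i + s + (t + 1) = i + (s + 1) + t := by omega
          simpa [pvMCh, he] using this
    rw [PySem.List.enumerate_cons]
    have hcast : ((s : Int) + 1) = ((s + 1 : Nat) : Int) := by push_cast; ring
    by_cases hc : c = '_'
    · subst hc
      simp only [pvInnerA, beq_self_eq_true, if_true, hcast]
      rw [ihs]
      have hh : pvMCh ('_' :: tl) 0 (h.getD (i + s) ' ') = true := by simp [pvMCh]
      simp only [decide_eq_decide]
      rw [hsplit]
      have hh' := hh
      simp only [List.getD] at hh' ⊢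
      simp [hh']
    · have hcb : (c == '_') = false := by simp [hc]
      simp only [pvInnerA, hcb, Bool.false_eq_true, if_false]
      have hopt : h[i + s]? = some h[i + s] := List.getElem?_eq_getElem hlt
      by_cases hceq : c = h[i + s]
      · have hne : ¬ (PySem.List.pyGet? h ((i : Int) + (s : Int)) ≠ some c) := by
          rw [hget, hceq]; simp
        rw [if_neg hne, hcast, ihs]
        have hh : pvMCh (c :: tl) 0 (h.getD (i + s) ' ') = true := by
          simp [pvMCh, List.getD, hopt, hceq]
        simp only [decide_eq_decide]
        rw [hsplit]
        have hh' := hh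
        simp only [List.getD] at hh' ⊢
        simp [hh']
      · have hne : (PySem.List.pyGet? h ((i : Int) + (s : Int)) ≠ some c) := by
          rw [hget]; simp; exact fun e => hceq e.symm
        rw [if_pos hne]
        have hh : pvMCh (c :: tl) 0 (h.getD (i + s) ' ') = false := by
          simp [pvMCh, List.getD, hopt, hc]; exact hceq
        have hx : ¬ (∀ t < (c :: tl).length, pvMCh (c :: tl) t (h.getD (i + s + t) ' ') = true) := by
          rw [hsplit]
          rintro ⟨H0, -⟩
          rw [hh] at H0
          exact absurd H0 (by simp)
        rw [eq_comm, decide_eq_false_iff_not]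
        exact hx

theorem outerA_eq (nd h : List Char) (hm : nd.length ≤ h.length) :
    ∀ (L i : Nat), i + L = h.length + 1 - nd.length →
    pvOuterA nd h (PySem.List.pyRange (i : Int) ((h.length : Int) - (nd.length : Int) + 1) 1)
      = (match (List.range' i L).find? (pvMatch nd h) with
         | some j => (j : Int)
         | none => -1) := by
  intro L
  induction L with
  | zero =>
    intro i hi
    have hend : ((h.length : Int) - (nd.length : Int) + 1) ≤ (i : Int) := by
      have : i = h.length + 1 - nd.length := by omega
      subst this; omega
    rw [PySem.List.pyRange_one_eq_nil hend]
    simp [pvOuterA]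
  | succ L ih =>
    intro i hi
    have hib : (i : Int) < (h.length : Int) - (nd.length : Int) + 1 := by
      have : i < h.length + 1 - nd.length := by omega
      omega
    rw [PySem.List.pyRange_one_cons hib]
    have hbound : i + 0 + nd.length ≤ h.length := by omega
    have hinner := innerA_eq h nd i 0 hbound
    simp only [Nat.cast_zero, Nat.add_zero] at hinner
    rw [List.range'_succ, List.find?_cons]
    by_cases hfl : pvMatch nd h i = true
    · have : pvInnerA h (i : Int) (PySem.List.enumerate nd 0) = true := by
        rw [hinner]; simpa [pvMatch] using hfl
      simp [pvOuterA, this, hfl]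
    · have hfl' : pvMatch nd h i = false := by simpa using hfl
      have : pvInnerA h (i : Int) (PySem.List.enumerate nd 0) = false := by
        rw [hinner]; simpa [pvMatch] using hfl'
      simp only [pvOuterA, this, Bool.false_eq_true, if_false, hfl']
      have hcast : ((i : Int) + 1) = ((i + 1 : Nat) : Int) := by push_cast; ring
      rw [hcast]
      exact ih (i + 1) (by omega)

-- ---- B side ----

theorem build_spec (nd : List Char) :
    ∀ (d : PySem.Dict Char Nat) (w s : Nat) (c : Char) (j : Nat),
    (((pvBuildMasks d w s nd).1.getD c 0) ||| (pvBuildMasks d w s nd).2).testBit j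
      = (((d.getD c 0) ||| w).testBit j
         || (decide (s ≤ j) && decide (j - s < nd.length) && pvMCh nd (j - s) c)) := by
  induction nd with
  | nil => intro d w s c j; simp [pvBuildMasks]
  | cons c0 rest ih =>
    intro d w s c j
    by_cases h0 : c0 = '_'
    · subst h0
      simp only [pvBuildMasks, beq_self_eq_true, if_true]
      rw [ih]
      rcases Nat.lt_trichotomy j s with hlt | heq | hgt
      · have h1 : ¬ (s = j) := by omega
        have h2 : ¬ (s ≤ j) := by omega
        have h3 : ¬ (s + 1 ≤ j) := by omega
        simp [Nat.testBit_or, h2, h3]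
      · subst heq
        have h3 : ¬ (j + 1 ≤ j) := by omega
        simp [Nat.testBit_or, h3, pvMCh]
      · have h1 : ¬ (s = j) := by omega
        have h2 : s ≤ j := by omega
        have h3 : s + 1 ≤ j := by omega
        have h4 : j - s = (j - (s + 1)) + 1 := by omega
        have h5 : (j - (s + 1) < rest.length) = (j - s < rest.length + 1) := by
          simp only [eq_iff_iff]; omega
        have h6 : ¬ (j - s = 0) := by omega
        rw [h4]
        simp [Nat.testBit_or, testBit_one', h2, h3, h5, h6, pvMCh]
    · have hb : (c0 == '_') = false := by simp [h0]
      simp only [pvBuildMasks, hb, Bool.false_eq_true, reduceIte]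
      rw [ih]
      rw [PySem.Dict.getD_insert]
      by_cases hc : c = c0
      · subst hc
        simp only [reduceIte]
        rcases Nat.lt_trichotomy j s with hlt | heq | hgt
        · have h1 : ¬ (s = j) := by omega
          have h2 : ¬ (s ≤ j) := by omega
          have h3 : ¬ (s + 1 ≤ j) := by omega
          simp [Nat.testBit_or, h2, h3]
        · subst heq
          have h3 : ¬ (j + 1 ≤ j) := by omega
          simp [Nat.testBit_or, h3, pvMCh]
        · have h1 : ¬ (s = j) := by omega
          have h2 : s ≤ j := by omega
          have h3 : s + 1 ≤ j := by omega
          have h4 : j - s = (j - (s + 1)) + 1 := by omega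
          have h5 : (j - (s + 1) < rest.length) = (j - s < rest.length + 1) := by
            simp only [eq_iff_iff]; omega
          have h6 : ¬ (j - s = 0) := by omega
          rw [h4]
          simp [Nat.testBit_or, testBit_one', h2, h3, h5, h6, pvMCh]
      · rw [if_neg hc]
        rcases Nat.lt_trichotomy j s with hlt | heq | hgt
        · have h2 : ¬ (s ≤ j) := by omega
          have h3 : ¬ (s + 1 ≤ j) := by omega
          simp [h2, h3]
        · subst heq
          have h3 : ¬ (j + 1 ≤ j) := by omega
          have hcc : (c0 == c) = false := by simp; exact fun e => hc e.symm
          simp [h3, pvMCh, h0, hcc]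
        · have h2 : s ≤ j := by omega
          have h3 : s + 1 ≤ j := by omega
          have h4 : j - s = (j - (s + 1)) + 1 := by omega
          have h5 : (j - (s + 1) < rest.length) = (j - s < rest.length + 1) := by
            simp only [eq_iff_iff]; omega
          rw [h4]
          simp [h2, h3, h5, pvMCh]

-- the one-step bitset update: after consuming h[k], bit j says 'the needle
-- prefix of length j+1 matches the haystack window ending at index k'
theorem step_spec (nd h : List Char) (masks : PySem.Dict Char Nat) (wild : Nat)
    (hM : ∀ (c : Char) (j : Nat), ((masks.getD c 0) ||| wild).testBit j
            = (decide (j < nd.length) && pvMCh nd j c))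
    (k : Nat) (hk : k < h.length) (d : Nat)
    (hInv : ∀ j, d.testBit j = (decide (j < nd.length ∧ j + 1 ≤ k)
        && decide (∀ t ≤ j, pvMCh nd t (h.getD (k - 1 - j + t) ' ') = true))) :
    ∀ j, (((d <<< 1) ||| 1) &&& (masks.getD h[k] 0 ||| wild)).testBit j
      = (decide (j < nd.length ∧ j + 1 ≤ k + 1)
         && decide (∀ t ≤ j, pvMCh nd t (h.getD (k - j + t) ' ') = true)) := by
  intro j
  rw [Nat.testBit_and, Nat.testBit_or, Nat.testBit_shiftLeft, testBit_one', hM]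
  have hgdk : h.getD k ' ' = h[k] := List.getD_eq_getElem h ' ' hk
  cases j with
  | zero =>
    have hsp : (∀ t ≤ (0:Nat), pvMCh nd t (h.getD (k - 0 + t) ' ') = true) ↔ pvMCh nd 0 h[k] = true := by
      constructor
      · intro H; have := H 0 le_rfl; rwa [show k - 0 + 0 = k by omega, hgdk] at this
      · intro H t ht
        have : t = 0 := by omega
        subst this; rwa [show k - 0 + 0 = k by omega, hgdk]
    have e0 : (decide ((1:Nat) ≤ 0) : Bool) = false := by simp
    have e1 : (decide ((0:Nat) = 0) : Bool) = true := by simp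
    rw [e0, e1]
    simp only [Bool.false_and, Bool.false_or, Bool.true_and]
    have e2 : decide ((0:Nat) < nd.length ∧ 0 + 1 ≤ k + 1) = decide ((0:Nat) < nd.length) := by
      simp only [decide_eq_decide]; omega
    have e5 : decide (∀ t ≤ (0:Nat), pvMCh nd t (h.getD (k - 0 + t) ' ') = true) = pvMCh nd 0 h[k] := by
      simp only [hsp]
      cases pvMCh nd 0 h[k] <;> simp
    rw [e2, e5]
  | succ j =>
    have e0 : (decide (1 ≤ j + 1) : Bool) = true := by simp
    have e1 : (decide (j + 1 = 0) : Bool) = false := by simp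
    rw [e0, e1, hInv]
    simp only [Nat.add_sub_cancel, Bool.true_and, Bool.or_false]
    by_cases hk1 : j + 1 ≤ k
    · by_cases hm' : j + 1 < nd.length
      · have hPsplit : (∀ t ≤ j + 1, pvMCh nd t (h.getD (k - (j + 1) + t) ' ') = true)
            ↔ ((∀ t ≤ j, pvMCh nd t (h.getD (k - 1 - j + t) ' ') = true)
               ∧ pvMCh nd (j + 1) h[k] = true) := by
          constructor
          · intro H
            refine ⟨fun t ht => ?_, ?_⟩
            · have := H t (by omega)
              rwa [show k - (j + 1) + t = k - 1 - j + t by omega] at this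
            · have := H (j + 1) le_rfl
              rwa [show k - (j + 1) + (j + 1) = k by omega, hgdk] at this
          · rintro ⟨H1, H2⟩ t ht
            rcases Nat.lt_or_ge t (j + 1) with h' | h'
            · have := H1 t (by omega)
              rwa [show k - 1 - j + t = k - (j + 1) + t by omega] at this
            · have : t = j + 1 := by omega
              subst this
              rwa [show k - (j + 1) + (j + 1) = k by omega, hgdk]
        have e2 : decide (j < nd.length ∧ j + 1 ≤ k) = true := by
          simp only [decide_eq_true_eq]; omega
        have e3 : decide (j + 1 < nd.length ∧ j + 1 + 1 ≤ k + 1) = true := by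
          simp only [decide_eq_true_eq]; omega
        have e4 : decide (j + 1 < nd.length) = true := by simp [hm']
        rw [e2, e3, e4]
        simp only [Bool.true_and]
        have e5 : decide (∀ t ≤ j + 1, pvMCh nd t (h.getD (k - (j + 1) + t) ' ') = true)
            = (decide (∀ t ≤ j, pvMCh nd t (h.getD (k - 1 - j + t) ' ') = true)
               && pvMCh nd (j + 1) h[k]) := by
          simp only [hPsplit, Bool.decide_and]
          congr 1
          cases pvMCh nd (j + 1) h[k] <;> simp
        rw [e5]
      · have e3 : decide (j + 1 < nd.length ∧ j + 1 + 1 ≤ k + 1) = false := by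
          simp only [decide_eq_false_iff_not]; omega
        have e4 : decide (j + 1 < nd.length) = false := by simp [hm']
        rw [e3, e4]
        simp
    · have e2 : decide (j < nd.length ∧ j + 1 ≤ k) = false := by
        simp only [decide_eq_false_iff_not]; omega
      have e3 : decide (j + 1 < nd.length ∧ j + 1 + 1 ≤ k + 1) = false := by
        simp only [decide_eq_false_iff_not]; omega
      rw [e2, e3]
      simp

theorem scan_eq (nd h : List Char) (masks : PySem.Dict Char Nat) (wild : Nat)
    (hm1 : 1 ≤ nd.length)
    (hM : ∀ (c : Char) (j : Nat), ((masks.getD c 0) ||| wild).testBit j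
            = (decide (j < nd.length) && pvMCh nd j c)) :
    ∀ (rest : List Char) (k : Nat) (d : Nat), rest = h.drop k → k ≤ h.length →
    (∀ j, d.testBit j = (decide (j < nd.length ∧ j + 1 ≤ k)
        && decide (∀ t ≤ j, pvMCh nd t (h.getD (k - 1 - j + t) ' ') = true))) →
    (∀ i, i + nd.length ≤ k → pvMatch nd h i = false) →
    pvScan masks wild (1 <<< (nd.length - 1)) nd.length d k rest
      = (match (List.range' 0 (h.length + 1 - nd.length)).find? (pvMatch nd h) with
         | some j => (j : Int)
         | none => -1) := by
  intro rest
  induction rest with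
  | nil =>
    intro k d hdrop hk hInv hNo
    have hkn : h.length ≤ k := by
      have := congrArg List.length hdrop
      simp at this
      omega
    have hfind : (List.range' 0 (h.length + 1 - nd.length)).find? (pvMatch nd h) = none := by
      rw [List.find?_eq_none]
      intro x hx
      have hx' : x < h.length + 1 - nd.length := by
        have := List.mem_range'_1.mp hx
        omega
      simp [hNo x (by omega)]
    rw [hfind]
    rfl
  | cons c rest' ih =>
    intro k d hdrop hk hInv hNo
    have hkl : k < h.length := by
      have := congrArg List.length hdrop
      simp at this
      omega
    have hcons : h.drop k = h[k] :: h.drop (k + 1) := List.drop_eq_getElem_cons hkl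
    rw [hcons] at hdrop
    have hc : c = h[k] := (List.cons_eq_cons.mp hdrop).1
    have hrest : rest' = h.drop (k + 1) := (List.cons_eq_cons.mp hdrop).2
    subst hc
    have hstep := step_spec nd h masks wild hM k hkl d hInv
    simp only [pvScan]
    by_cases hhit : (((d <<< 1) ||| 1) &&& (masks.getD h[k] 0 ||| wild)) &&& (1 <<< (nd.length - 1)) ≠ 0
    · rw [if_pos hhit]
      rw [and_shift_ne_zero] at hhit
      rw [hstep (nd.length - 1)] at hhit
      simp only [Bool.and_eq_true, decide_eq_true_eq] at hhit
      obtain ⟨⟨_, hmk⟩, hall⟩ := hhit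
      have hm_le : nd.length ≤ k + 1 := by omega
      have hmatch : pvMatch nd h (k + 1 - nd.length) = true := by
        simp only [pvMatch, decide_eq_true_eq]
        intro t ht
        have := hall t (by omega)
        rwa [show k - (nd.length - 1) + t = k + 1 - nd.length + t by omega] at this
      have hfind : (List.range' 0 (h.length + 1 - nd.length)).find? (pvMatch nd h)
          = some (k + 1 - nd.length) := by
        apply pvFindRangeLemma _ _ 0 _ (by omega) (by omega) hmatch
        intro i _ hi
        exact hNo i (by omega)
      rw [hfind]
      show (k : Int) - (nd.length : Int) + 1 = ((k + 1 - nd.length : Nat) : Int)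
      omega
    · rw [if_neg hhit]
      rw [and_shift_ne_zero] at hhit
      apply ih (k + 1) _ hrest (by omega)
      · intro j
        have := hstep j
        rwa [show k + 1 - 1 - j = k - j by omega]
      · intro i hi
        rcases Nat.lt_or_ge (i + nd.length) (k + 1) with h' | h'
        · exact hNo i (by omega)
        · have hik : i + nd.length = k + 1 := by omega
          by_contra hcon
          have hmt : pvMatch nd h i = true := by
            cases hx : pvMatch nd h i
            · exact absurd hx hcon
            · rfl
          apply hhit
          rw [hstep (nd.length - 1)]
          simp only [Bool.and_eq_true, decide_eq_true_eq]
          refine ⟨⟨by omega, by omega⟩, ?_⟩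
          intro t ht
          simp only [pvMatch, decide_eq_true_eq] at hmt
          have := hmt t (by omega)
          rwa [show i + t = k - (nd.length - 1) + t by omega] at this

-- ===== VERDICT (by name: the statement is the Claim_ definition above) =====
theorem find_spec : Claim_equal_find := by
  intro needle haystack _
  unfold Spec_find find find_alt
  by_cases hnd : needle.toList.length = 0
  · rw [if_pos hnd]
    have hnil : needle.toList = [] := List.length_eq_zero_iff.mp hnd
    have h0 : (0 : Int) < (haystack.toList.length : Int) - (needle.toList.length : Int) + 1 := by
      rw [hnd]; push_cast; omega
    rw [PySem.List.pyRange_one_cons h0, hnil]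
    simp [pvOuterA, pvInnerA, PySem.List.enumerate_nil]
  · rw [if_neg hnd]
    have hm1 : 1 ≤ needle.toList.length := by omega
    have hMm : ∀ (c : Char) (j : Nat),
        (((pvBuildMasks PySem.Dict.empty 0 0 needle.toList).1.getD c 0)
          ||| (pvBuildMasks PySem.Dict.empty 0 0 needle.toList).2).testBit j
        = (decide (j < needle.toList.length) && pvMCh needle.toList j c) := by
      intro c j
      rw [build_spec]
      have he : (((PySem.Dict.empty : PySem.Dict Char Nat).getD c 0) ||| 0) = 0 := by
        simp [PySem.Dict.getD, PySem.Dict.empty, PySem.Dict.get?]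
      rw [he]
      simp only [Nat.zero_testBit, Bool.false_or, Nat.sub_zero, Nat.zero_le, decide_true, Bool.true_and]
    have hscan := scan_eq needle.toList haystack.toList _ _ hm1 hMm haystack.toList 0 0
      (by simp) (by omega)
      (by intro j; simp)
      (by intro i hi; omega)
    rw [hscan]
    by_cases hmn : needle.toList.length ≤ haystack.toList.length
    · have := outerA_eq needle.toList haystack.toList hmn
        (haystack.toList.length + 1 - needle.toList.length) 0 (by omega)
      simpa using this
    · rw [PySem.List.pyRange_one_eq_nil (by omega)]
      rw [show haystack.toList.length + 1 - needle.toList.length = 0 by omega]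
      simp [pvOuterA]
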